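-- pv_equiv track=rewrite | github.com/MarllonCampos/TrabalhoPII-Faculdade | Utils.py | geraNovoVetor
-- ===== SOURCE A (Python) =====
-- def geraNovoVetor(k,kLinha,vetorInicial,vetorDeControle):
--     vetorFinal = vetorInicial.copy()
--     for index, elem in enumerate(k):
--         for i, e in enumerate(vetorFinal):
--             if e == elem and vetorDeControle[i] == 0:
--                 vetorFinal[i] = kLinha[index]
--                 vetorDeControle[i]=1
--
--     return vetorFinal
-- ===== SOURCE B (Python) =====
-- def geraNovoVetor(k, kLinha, vetorInicial, vetorDeControle):
--     # One pass over the vector using a first-index map of k, instead of k x vector nested scans.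
--     # Like A, marks replaced positions in vetorDeControle in place.
--     first = {}
--     for index, elem in enumerate(k):
--         if elem not in first:
--             first[elem] = index
--     vetorFinal = []
--     for i, v in enumerate(vetorInicial):
--         if v in first and vetorDeControle[i] == 0:
--             vetorFinal.append(kLinha[first[v]])
--             vetorDeControle[i] = 1
--         else:
--             vetorFinal.append(v)
--     return vetorFinal
-- ===== Notes on version B (the rewrite author's own statement) =====
-- stated objective: faster
-- what changed: Replaces the k-by-vector nested scan with a first-index dict over k built once, then a single pass over the vector that looks each value up, so the vector is traversed once instead of once per element of k.
import Mathlib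
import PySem

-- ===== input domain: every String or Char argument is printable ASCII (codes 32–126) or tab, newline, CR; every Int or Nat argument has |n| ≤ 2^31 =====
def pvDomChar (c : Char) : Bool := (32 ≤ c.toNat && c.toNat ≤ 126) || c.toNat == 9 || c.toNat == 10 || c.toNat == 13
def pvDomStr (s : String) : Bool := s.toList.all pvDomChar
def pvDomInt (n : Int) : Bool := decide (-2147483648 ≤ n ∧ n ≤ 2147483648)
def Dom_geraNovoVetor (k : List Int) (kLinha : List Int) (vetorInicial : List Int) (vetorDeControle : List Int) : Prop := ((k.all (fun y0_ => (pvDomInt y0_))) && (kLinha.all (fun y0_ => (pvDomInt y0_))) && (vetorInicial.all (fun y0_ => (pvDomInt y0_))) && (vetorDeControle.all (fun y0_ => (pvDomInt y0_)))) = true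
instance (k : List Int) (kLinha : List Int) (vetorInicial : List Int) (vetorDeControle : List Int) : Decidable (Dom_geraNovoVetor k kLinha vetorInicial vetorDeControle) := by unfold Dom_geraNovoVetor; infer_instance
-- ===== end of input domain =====

-- B replaces A's k×vector nested scan by a first-index dict over k plus one pass over the vector (faster).
-- Both Pythons also mutate vetorDeControle in place identically; the equivalence proved here is about the RETURN value.

-- ===== PORT A =====
-- Literal port of A: for index,elem in enumerate(k): for i,e in enumerate(vetorFinal): … .
-- Python's inner `enumerate(vetorFinal)` iterates the live list, but within one inner pass the
-- element at i is only ever written when visiting i, so the snapshot pair (i, e) read here is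
-- exactly the value Python's iterator yields (exact).
def geraNovoVetor (k : List Int) (kLinha : List Int) (vetorInicial : List Int) (vetorDeControle : List Int) : List Int :=
  (((PySem.List.enumerate k 0).foldl
      (fun (st : List Int × List Int) (p : Int × Int) =>
        (PySem.List.enumerate st.1 0).foldl
          (fun (st2 : List Int × List Int) (q : Int × Int) =>
            if q.2 == p.2 && PySem.List.pyGetD st2.2 q.1 0 == 0 then
              (PySem.List.pySetD st2.1 q.1 (PySem.List.pyGetD kLinha p.1 0),
               PySem.List.pySetD st2.2 q.1 1)
            else st2)
          st)
      (vetorInicial, vetorDeControle))).1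

-- ===== PORT B =====
-- first-index dict of k: insert only if the key is absent (Source B's `if elem not in first`)
def pvBuildFirst (k : List Int) : PySem.Dict Int Int :=
  (PySem.List.enumerate k 0).foldl
    (fun d p => if !(d.contains p.2) then d.insert p.2 p.1 else d) PySem.Dict.empty

def geraNovoVetor_alt (k : List Int) (kLinha : List Int) (vetorInicial : List Int) (vetorDeControle : List Int) : List Int :=
  let first := pvBuildFirst k
  (((PySem.List.enumerate vetorInicial 0).foldl
      (fun (st : List Int × List Int) (p : Int × Int) =>
        if first.contains p.2 && PySem.List.pyGetD st.2 p.1 0 == 0 then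
          (st.1 ++ [PySem.List.pyGetD kLinha (first.getD p.2 0) 0], PySem.List.pySetD st.2 p.1 1)
        else (st.1 ++ [p.2], st.2))
      ([], vetorDeControle))).1

-- ===== PRECONDITION & SPEC =====
-- Exactly the inputs on which Python A returns: whenever a vector position holds a value occurring in k,
-- the control vector must cover that position (else vetorDeControle[i] raises IndexError), and if that
-- position is unmarked, kLinha must cover the first occurrence of the value in k (else kLinha[index] raises).
def Pre_geraNovoVetor (k : List Int) (kLinha : List Int) (vetorInicial : List Int) (vetorDeControle : List Int) : Prop :=
  ∀ i : Nat, i < vetorInicial.length → vetorInicial.getD i 0 ∈ k →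
    (i < vetorDeControle.length ∧
      (vetorDeControle.getD i 0 = 0 → k.idxOf (vetorInicial.getD i 0) < kLinha.length))
instance (k : List Int) (kLinha : List Int) (vetorInicial : List Int) (vetorDeControle : List Int) : Decidable (Pre_geraNovoVetor k kLinha vetorInicial vetorDeControle) := by unfold Pre_geraNovoVetor; infer_instance

def pvWitness_geraNovoVetor : List Int × List Int × List Int × List Int := ([1, 2], [10, 20], [1, 3, 2], [0, 1, 0])

def Spec_geraNovoVetor (k : List Int) (kLinha : List Int) (vetorInicial : List Int) (vetorDeControle : List Int) (out : List Int) : Prop := out = geraNovoVetor_alt k kLinha vetorInicial vetorDeControle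
instance (k : List Int) (kLinha : List Int) (vetorInicial : List Int) (vetorDeControle : List Int) (out : List Int) : Decidable (Spec_geraNovoVetor k kLinha vetorInicial vetorDeControle out) := by unfold Spec_geraNovoVetor; infer_instance

-- ===== CLAIM (what is proved, stated in full; the proofs are below) =====
def Claim_equal_geraNovoVetor : Prop := ∀ (k : List Int) (kLinha : List Int) (vetorInicial : List Int) (vetorDeControle : List Int), Dom_geraNovoVetor k kLinha vetorInicial vetorDeControle → Pre_geraNovoVetor k kLinha vetorInicial vetorDeControle → Spec_geraNovoVetor k kLinha vetorInicial vetorDeControle (geraNovoVetor k kLinha vetorInicial vetorDeControle)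

-- ===== LEMMAS AND PROOFS =====

def pvCellStep (kLinha : List Int) (s : Int × Int) (p : Int × Int) : Int × Int :=
  if s.1 == p.2 && s.2 == 0 then (PySem.List.pyGetD kLinha p.1 0, 1) else s

def pvCellFold (kLinha : List Int) (ps : List (Int × Int)) (v c : Int) : Int × Int :=
  ps.foldl (pvCellStep kLinha) (v, c)

theorem pvGetD_set (l : List Int) (i j : Nat) (a d : Int) :
    (l.set i a).getD j d = if i = j ∧ i < l.length then a else l.getD j d := by
  by_cases h : i = j
  · subst h
    by_cases h2 : i < l.length
    · simp [List.getD_eq_getElem?_getD, List.getElem?_set, h2]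
    · rw [List.set_eq_of_length_le (by omega)]
      simp [h2]
  · simp [List.getD_eq_getElem?_getD, List.getElem?_set, h]

theorem pvCell_frozen (kLinha : List Int) (ps : List (Int × Int)) (v c : Int) (hc : (c == 0) = false) :
    pvCellFold kLinha ps v c = (v, c) := by
  induction ps with
  | nil => rfl
  | cons p ps ih => simp [pvCellFold, pvCellStep, hc] at ih ⊢; exact ih

theorem pvCell_zero (kLinha : List Int) (k : List Int) (s : Nat) (v : Int) :
    pvCellFold kLinha (PySem.List.enumerate k (s : Int)) v 0
      = if v ∈ k then (PySem.List.pyGetD kLinha ((s : Int) + k.idxOf v) 0, 1) else (v, 0) := by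
  induction k generalizing s with
  | nil => simp [PySem.List.enumerate_nil, pvCellFold]
  | cons x ks ih =>
    rw [PySem.List.enumerate_cons]
    by_cases hv : v = x
    · subst hv
      simp only [pvCellFold, List.foldl_cons, pvCellStep, BEq.rfl, Bool.and_self, if_true]
      have := pvCell_frozen kLinha (PySem.List.enumerate ks ((s:Int)+1)) (PySem.List.pyGetD kLinha (s:Int) 0) 1 (by decide)
      simp only [pvCellFold] at this
      rw [this]
      simp [List.idxOf_cons_self]
    · simp only [pvCellFold, List.foldl_cons, pvCellStep]
      have hbeq : (v == x) = false := by simp [hv]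
      simp only [hbeq, Bool.false_and, Bool.false_eq_true, if_false]
      have hc : ((s:Int) + 1) = (((s+1 : Nat)) : Int) := by push_cast; ring
      rw [hc]
      have h2 := ih (s+1)
      simp only [pvCellFold] at h2
      rw [h2]
      by_cases hm : v ∈ ks
      · rw [List.idxOf_cons_ne _ (Ne.symm hv)]
        simp only [List.mem_cons, hv, false_or, hm, if_true]
        push_cast
        ring_nf
      · simp [hm, hv]

theorem pvBuildFirstGo_contains (k : List Int) (s : Nat) (d : PySem.Dict Int Int) (v : Int) :
    ((PySem.List.enumerate k (s : Int)).foldl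
        (fun d p => if !(d.contains p.2) then d.insert p.2 p.1 else d) d).contains v
      = (d.contains v || k.contains v) := by
  induction k generalizing s d with
  | nil => simp [PySem.List.enumerate_nil]
  | cons x ks ih =>
    rw [PySem.List.enumerate_cons, List.foldl_cons]
    have hc : ((s:Int) + 1) = (((s+1 : Nat)) : Int) := by push_cast; ring
    rw [hc]
    by_cases hd : d.contains x
    · simp only [hd, Bool.not_true, Bool.false_eq_true, if_false]
      rw [ih (s+1) d]
      by_cases hv : v = x
      · subst hv; simp [hd]
      · simp [List.contains_cons, hv]
    · simp only [hd, Bool.not_false, if_true]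
      rw [ih (s+1) (d.insert x (s:Int))]
      rw [PySem.Dict.contains_insert]
      by_cases hv : v = x
      · subst hv; simp
      · have : (v == x) = false := by simp [hv]
        simp [List.contains_cons, this, hv]

theorem pvBuildFirstGo_getD (k : List Int) (s : Nat) (d : PySem.Dict Int Int) (v : Int) :
    ((PySem.List.enumerate k (s : Int)).foldl
        (fun d p => if !(d.contains p.2) then d.insert p.2 p.1 else d) d).getD v 0
      = if d.contains v then d.getD v 0
        else if v ∈ k then (s : Int) + k.idxOf v else 0 := by
  induction k generalizing s d with
  | nil =>
    simp only [PySem.List.enumerate_nil, List.foldl_nil, List.not_mem_nil, if_false]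
    by_cases hd : d.contains v
    · simp [hd]
    · rw [PySem.Dict.getD_eq_get?_getD]
      rw [(PySem.Dict.get?_eq_none_iff_contains _ _).2 (by simp [hd])]
      simp [hd]
  | cons x ks ih =>
    rw [PySem.List.enumerate_cons, List.foldl_cons]
    have hc : ((s:Int) + 1) = (((s+1 : Nat)) : Int) := by push_cast; ring
    rw [hc]
    by_cases hd : d.contains x
    · simp only [hd, Bool.not_true, Bool.false_eq_true, if_false]
      rw [ih (s+1) d]
      by_cases hdv : d.contains v
      · simp [hdv]
      · have hv : v ≠ x := fun h => hdv (h ▸ hd)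
        simp only [hdv, Bool.false_eq_true, if_false, List.mem_cons, hv, false_or]
        by_cases hm : v ∈ ks
        · rw [List.idxOf_cons_ne _ (Ne.symm hv)]
          simp [hm]; push_cast; ring
        · simp [hm]
    · simp only [hd, Bool.not_false, if_true]
      rw [ih (s+1) (d.insert x (s:Int))]
      by_cases hv : v = x
      · subst hv
        simp [PySem.Dict.contains_insert_self, PySem.Dict.getD_insert_self, hd, List.idxOf_cons_self]
      · rw [PySem.Dict.contains_insert, PySem.Dict.getD_insert]
        have : (v == x) = false := by simp [hv]
        simp only [this, Bool.false_or, if_neg hv, List.mem_cons, hv, false_or]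
        by_cases hdv : d.contains v
        · simp [hdv]
        · simp only [hdv, Bool.false_eq_true, if_false]
          by_cases hm : v ∈ ks
          · rw [List.idxOf_cons_ne _ (Ne.symm hv)]
            simp [hm]; push_cast; ring
          · simp [hm]

theorem pvB_char (kLinha : List Int) (first : PySem.Dict Int Int) (l : List Int) (s : Nat) (acc cs : List Int) :
    ((PySem.List.enumerate l (s : Int)).foldl
        (fun (st : List Int × List Int) (p : Int × Int) =>
          if first.contains p.2 && PySem.List.pyGetD st.2 p.1 0 == 0 then
            (st.1 ++ [PySem.List.pyGetD kLinha (first.getD p.2 0) 0], PySem.List.pySetD st.2 p.1 1)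
          else (st.1 ++ [p.2], st.2)) (acc, cs)).1
      = acc ++ l.mapIdx (fun t v =>
          if first.contains v && cs.getD (s + t) 0 == 0 then
            PySem.List.pyGetD kLinha (first.getD v 0) 0 else v) := by
  induction l generalizing s acc cs with
  | nil => simp [PySem.List.enumerate_nil]
  | cons x xs ih =>
    rw [PySem.List.enumerate_cons, List.foldl_cons, List.mapIdx_cons]
    have hc : ((s:Int) + 1) = (((s+1 : Nat)) : Int) := by push_cast; ring
    have hg : PySem.List.pyGetD cs (s:Int) 0 = cs.getD s 0 := by
      simp [PySem.List.pyGetD_natCast]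
    have h0 : s + 0 = s := by omega
    by_cases hcond : (first.contains x && cs.getD s 0 == 0) = true
    · simp only [hg, hcond, if_true, hc, h0]
      rw [ih (s+1) _ _, PySem.List.pySetD_natCast]
      have hfun : (fun (t : Nat) (v : Int) =>
          if (first.contains v && (cs.set s 1).getD (s + 1 + t) 0 == 0) = true then
            PySem.List.pyGetD kLinha (first.getD v 0) 0 else v)
        = (fun (i : Nat) (v : Int) =>
          if (first.contains v && cs.getD (s + (i + 1)) 0 == 0) = true then
            PySem.List.pyGetD kLinha (first.getD v 0) 0 else v) := by
        funext t v
        rw [pvGetD_set]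
        have hne : ¬ (s = s + 1 + t ∧ s < cs.length) := by omega
        rw [if_neg hne]
        have h2 : s + 1 + t = s + (t + 1) := by omega
        rw [h2]
      rw [hfun]
      simp
    · simp only [hg, hcond, Bool.false_eq_true, if_false, hc, h0]
      rw [ih (s+1) _ _]
      have hfun : (fun (t : Nat) (v : Int) =>
          if (first.contains v && cs.getD (s + 1 + t) 0 == 0) = true then
            PySem.List.pyGetD kLinha (first.getD v 0) 0 else v)
        = (fun (i : Nat) (v : Int) =>
          if (first.contains v && cs.getD (s + (i + 1)) 0 == 0) = true then
            PySem.List.pyGetD kLinha (first.getD v 0) 0 else v) := by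
        funext t v
        have h2 : s + 1 + t = s + (t + 1) := by omega
        rw [h2]
      rw [hfun]
      simp

theorem pvInner_char (elem kval : Int) (l : List Int) (s : Nat) (a c : List Int) :
    (((PySem.List.enumerate l (s : Int)).foldl
        (fun (st2 : List Int × List Int) (q : Int × Int) =>
          if q.2 == elem && PySem.List.pyGetD st2.2 q.1 0 == 0 then
            (PySem.List.pySetD st2.1 q.1 kval, PySem.List.pySetD st2.2 q.1 1)
          else st2) (a, c)).1.length = a.length) ∧
    (((PySem.List.enumerate l (s : Int)).foldl
        (fun (st2 : List Int × List Int) (q : Int × Int) =>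
          if q.2 == elem && PySem.List.pyGetD st2.2 q.1 0 == 0 then
            (PySem.List.pySetD st2.1 q.1 kval, PySem.List.pySetD st2.2 q.1 1)
          else st2) (a, c)).2.length = c.length) ∧
    (∀ j : Nat,
      (((PySem.List.enumerate l (s : Int)).foldl
        (fun (st2 : List Int × List Int) (q : Int × Int) =>
          if q.2 == elem && PySem.List.pyGetD st2.2 q.1 0 == 0 then
            (PySem.List.pySetD st2.1 q.1 kval, PySem.List.pySetD st2.2 q.1 1)
          else st2) (a, c)).1.getD j 0 =
        if s ≤ j ∧ j - s < l.length ∧ j < a.length ∧ (l.getD (j - s) 0 == elem && c.getD j 0 == 0) = true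
        then kval else a.getD j 0) ∧
      (((PySem.List.enumerate l (s : Int)).foldl
        (fun (st2 : List Int × List Int) (q : Int × Int) =>
          if q.2 == elem && PySem.List.pyGetD st2.2 q.1 0 == 0 then
            (PySem.List.pySetD st2.1 q.1 kval, PySem.List.pySetD st2.2 q.1 1)
          else st2) (a, c)).2.getD j 0 =
        if s ≤ j ∧ j - s < l.length ∧ j < c.length ∧ (l.getD (j - s) 0 == elem && c.getD j 0 == 0) = true
        then 1 else c.getD j 0)) := by
  induction l generalizing s a c with
  | nil =>
    refine ⟨by simp [PySem.List.enumerate_nil], by simp [PySem.List.enumerate_nil], ?_⟩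
    intro j
    simp [PySem.List.enumerate_nil]
  | cons x xs ih =>
    rw [PySem.List.enumerate_cons, List.foldl_cons]
    have hc : ((s:Int) + 1) = (((s+1 : Nat)) : Int) := by push_cast; ring
    have hg : PySem.List.pyGetD c (s:Int) 0 = c.getD s 0 := by
      simp [PySem.List.pyGetD_natCast]
    by_cases hcond : (x == elem && c.getD s 0 == 0) = true
    · simp only [hg, hcond, if_true, hc, PySem.List.pySetD_natCast]
      obtain ⟨ih1, ih2, ih3⟩ := ih (s+1) (a.set s kval) (c.set s 1)
      refine ⟨by rw [ih1]; simp, by rw [ih2]; simp, ?_⟩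
      intro j
      obtain ⟨ihj1, ihj2⟩ := ih3 j
      have hxx : s < j → (x::xs).getD (j - s) 0 = xs.getD (j - (s+1)) 0 := by
        intro hj
        have h2 : j - s = (j - (s+1)) + 1 := by omega
        rw [h2, List.getD_cons_succ]
      constructor
      · rw [ihj1]
        rcases lt_trichotomy j s with hj | hj | hj
        · rw [if_neg (fun h => absurd h.1 (by omega)),
              if_neg (fun h => absurd h.1 (by omega)),
              pvGetD_set, if_neg (fun h => absurd h.1 (by omega))]
        · subst hj
          rw [if_neg (fun h => absurd h.1 (by omega)), pvGetD_set]
          have hz : j - j = 0 := by omega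
          simp only [hz, List.getD_cons_zero, List.length_cons, List.length_set, hcond, and_true]
          split_ifs with h1 h2 h2 <;> first | rfl | (exfalso; simp only [true_and, le_refl, not_and] at h1 h2; omega)
        · have hlen : (a.set s kval).length = a.length := by simp
          have hcs : (c.set s 1).getD j 0 = c.getD j 0 := by
            rw [pvGetD_set, if_neg (fun h => absurd h.1 (by omega))]
          have hfall : (a.set s kval).getD j 0 = a.getD j 0 := by
            rw [pvGetD_set, if_neg (fun h => absurd h.1 (by omega))]
          rw [hlen, hcs, hfall, hxx hj]
          simp only [List.length_cons]
          split_ifs with h1 h2 h2 <;> try rfl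
          · exact absurd ⟨by omega, by omega, h1.2.2.1, h1.2.2.2⟩ h2
          · exact absurd ⟨by omega, by omega, h2.2.2.1, h2.2.2.2⟩ h1
      · rw [ihj2]
        rcases lt_trichotomy j s with hj | hj | hj
        · rw [if_neg (fun h => absurd h.1 (by omega)),
              if_neg (fun h => absurd h.1 (by omega)),
              pvGetD_set, if_neg (fun h => absurd h.1 (by omega))]
        · subst hj
          rw [if_neg (fun h => absurd h.1 (by omega)), pvGetD_set]
          have hz : j - j = 0 := by omega
          simp only [hz, List.getD_cons_zero, List.length_cons, List.length_set, hcond, and_true]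
          split_ifs with h1 h2 h2 <;> first | rfl | (exfalso; simp only [true_and, le_refl, not_and] at h1 h2; omega)
        · have hlen : (c.set s 1).length = c.length := by simp
          have hcs : (c.set s 1).getD j 0 = c.getD j 0 := by
            rw [pvGetD_set, if_neg (fun h => absurd h.1 (by omega))]
          rw [hlen, hcs, hxx hj]
          simp only [List.length_cons]
          split_ifs with h1 h2 h2 <;> try rfl
          · exact absurd ⟨by omega, by omega, h1.2.2.1, h1.2.2.2⟩ h2
          · exact absurd ⟨by omega, by omega, h2.2.2.1, h2.2.2.2⟩ h1
    · simp only [hg, hcond, Bool.false_eq_true, if_false, hc]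
      obtain ⟨ih1, ih2, ih3⟩ := ih (s+1) a c
      refine ⟨ih1, ih2, ?_⟩
      intro j
      obtain ⟨ihj1, ihj2⟩ := ih3 j
      have hxx : s < j → (x::xs).getD (j - s) 0 = xs.getD (j - (s+1)) 0 := by
        intro hj
        have h2 : j - s = (j - (s+1)) + 1 := by omega
        rw [h2, List.getD_cons_succ]
      constructor
      · rw [ihj1]
        rcases lt_trichotomy j s with hj | hj | hj
        · rw [if_neg (fun h => absurd h.1 (by omega)),
              if_neg (fun h => absurd h.1 (by omega))]
        · subst hj
          rw [if_neg (fun h => absurd h.1 (by omega))]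
          have hz : j - j = 0 := by omega
          rw [if_neg (fun h => by
            rw [hz, List.getD_cons_zero] at h
            exact absurd h.2.2.2 hcond)]
        · rw [hxx hj]
          simp only [List.length_cons]
          split_ifs with h1 h2 h2 <;> try rfl
          · exact absurd ⟨by omega, by omega, h1.2.2.1, h1.2.2.2⟩ h2
          · exact absurd ⟨by omega, by omega, h2.2.2.1, h2.2.2.2⟩ h1
      · rw [ihj2]
        rcases lt_trichotomy j s with hj | hj | hj
        · rw [if_neg (fun h => absurd h.1 (by omega)),
              if_neg (fun h => absurd h.1 (by omega))]
        · subst hj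
          rw [if_neg (fun h => absurd h.1 (by omega))]
          have hz : j - j = 0 := by omega
          rw [if_neg (fun h => by
            rw [hz, List.getD_cons_zero] at h
            exact absurd h.2.2.2 hcond)]
        · rw [hxx hj]
          simp only [List.length_cons]
          split_ifs with h1 h2 h2 <;> try rfl
          · exact absurd ⟨by omega, by omega, h1.2.2.1, h1.2.2.2⟩ h2
          · exact absurd ⟨by omega, by omega, h2.2.2.1, h2.2.2.2⟩ h1

theorem pvOuter_char (kLinha : List Int) (ps : List (Int × Int)) (vf vc : List Int)
    (h : ∀ j : Nat, j < vf.length → vc.length ≤ j → ∀ p' ∈ ps, (vf.getD j 0 == p'.2) = false) :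
    ((ps.foldl
        (fun (st : List Int × List Int) (p : Int × Int) =>
          (PySem.List.enumerate st.1 0).foldl
            (fun (st2 : List Int × List Int) (q : Int × Int) =>
              if q.2 == p.2 && PySem.List.pyGetD st2.2 q.1 0 == 0 then
                (PySem.List.pySetD st2.1 q.1 (PySem.List.pyGetD kLinha p.1 0),
                 PySem.List.pySetD st2.2 q.1 1)
              else st2) st) (vf, vc)).1.length = vf.length) ∧
    ((ps.foldl
        (fun (st : List Int × List Int) (p : Int × Int) =>
          (PySem.List.enumerate st.1 0).foldl
            (fun (st2 : List Int × List Int) (q : Int × Int) =>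
              if q.2 == p.2 && PySem.List.pyGetD st2.2 q.1 0 == 0 then
                (PySem.List.pySetD st2.1 q.1 (PySem.List.pyGetD kLinha p.1 0),
                 PySem.List.pySetD st2.2 q.1 1)
              else st2) st) (vf, vc)).2.length = vc.length) ∧
    (∀ j : Nat, j < vf.length →
      ((ps.foldl
        (fun (st : List Int × List Int) (p : Int × Int) =>
          (PySem.List.enumerate st.1 0).foldl
            (fun (st2 : List Int × List Int) (q : Int × Int) =>
              if q.2 == p.2 && PySem.List.pyGetD st2.2 q.1 0 == 0 then
                (PySem.List.pySetD st2.1 q.1 (PySem.List.pyGetD kLinha p.1 0),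
                 PySem.List.pySetD st2.2 q.1 1)
              else st2) st) (vf, vc)).1.getD j 0 = (pvCellFold kLinha ps (vf.getD j 0) (vc.getD j 0)).1) ∧
      ((ps.foldl
        (fun (st : List Int × List Int) (p : Int × Int) =>
          (PySem.List.enumerate st.1 0).foldl
            (fun (st2 : List Int × List Int) (q : Int × Int) =>
              if q.2 == p.2 && PySem.List.pyGetD st2.2 q.1 0 == 0 then
                (PySem.List.pySetD st2.1 q.1 (PySem.List.pyGetD kLinha p.1 0),
                 PySem.List.pySetD st2.2 q.1 1)
              else st2) st) (vf, vc)).2.getD j 0 = (pvCellFold kLinha ps (vf.getD j 0) (vc.getD j 0)).2)) := by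
  induction ps generalizing vf vc with
  | nil => exact ⟨rfl, rfl, fun j _ => ⟨rfl, rfl⟩⟩
  | cons p ps ih =>
    rw [List.foldl_cons]
    obtain ⟨in1, in2, in3⟩ := pvInner_char p.2 (PySem.List.pyGetD kLinha p.1 0) vf 0 vf vc
    simp only [Nat.cast_zero, Nat.sub_zero, Nat.zero_le, true_and] at in1 in2 in3
    set st1 := ((PySem.List.enumerate vf (0 : Int)).foldl
        (fun (st2 : List Int × List Int) (q : Int × Int) =>
          if q.2 == p.2 && PySem.List.pyGetD st2.2 q.1 0 == 0 then
            (PySem.List.pySetD st2.1 q.1 (PySem.List.pyGetD kLinha p.1 0),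
             PySem.List.pySetD st2.2 q.1 1)
          else st2) (vf, vc)) with hst1
    have hcell : ∀ j : Nat, j < vf.length →
        st1.1.getD j 0 = (pvCellStep kLinha (vf.getD j 0, vc.getD j 0) p).1 ∧
        st1.2.getD j 0 = (pvCellStep kLinha (vf.getD j 0, vc.getD j 0) p).2 := by
      intro j hj
      obtain ⟨i1, i2⟩ := in3 j
      by_cases hjc : j < vc.length
      · constructor
        · rw [i1, pvCellStep]
          simp only [hj, true_and, and_true]
          split_ifs with h1 h2 h2 <;> first | rfl | (exfalso; tauto)
        · rw [i2, pvCellStep]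
          simp only [hj, hjc, true_and, and_true]
          split_ifs with h1 h2 h2 <;> first | rfl | (exfalso; tauto)
      · have hnf : (vf.getD j 0 == p.2) = false :=
          h j hj (by omega) p (List.mem_cons_self)
        constructor
        · rw [i1, pvCellStep]
          simp only [hnf, Bool.false_and, Bool.false_eq_true, and_false, if_false]
        · rw [i2, pvCellStep]
          simp only [hnf, Bool.false_and, Bool.false_eq_true, and_false, if_false]
    obtain ⟨oh1, oh2, oh3⟩ := ih st1.1 st1.2 (by
      intro j hj hjc p' hp'
      rw [in1] at hj
      rw [in2] at hjc
      have hnf : (vf.getD j 0 == p.2) = false :=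
        h j hj hjc p (List.mem_cons_self)
      have hst : st1.1.getD j 0 = vf.getD j 0 := by
        rw [(hcell j hj).1, pvCellStep]
        simp only [hnf, Bool.false_and, Bool.false_eq_true, if_false]
      rw [hst]
      exact h j hj hjc p' (List.mem_cons_of_mem _ hp'))
    refine ⟨by rw [oh1, in1], by rw [oh2, in2], ?_⟩
    intro j hj
    obtain ⟨o1, o2⟩ := oh3 j (by rw [in1]; exact hj)
    obtain ⟨hi1, hi2⟩ := hcell j hj
    constructor
    · rw [o1, hi1, hi2, pvCellFold, pvCellFold, List.foldl_cons]
    · rw [o2, hi1, hi2, pvCellFold, pvCellFold, List.foldl_cons]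

theorem pvBuildFirst_contains (k : List Int) (v : Int) :
    (pvBuildFirst k).contains v = k.contains v := by
  have := pvBuildFirstGo_contains k 0 PySem.Dict.empty v
  simp only [Nat.cast_zero, PySem.Dict.contains_empty, Bool.false_or] at this
  exact this

theorem pvBuildFirst_getD (k : List Int) (v : Int) :
    (pvBuildFirst k).getD v 0 = if v ∈ k then (k.idxOf v : Int) else 0 := by
  have := pvBuildFirstGo_getD k 0 PySem.Dict.empty v
  simp only [Nat.cast_zero, PySem.Dict.contains_empty, Bool.false_eq_true, if_false, zero_add] at this
  exact this

theorem pvCell_eq_lookup (kLinha : List Int) (k : List Int) (v c : Int) :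
    (pvCellFold kLinha (PySem.List.enumerate k 0) v c).1
      = if (pvBuildFirst k).contains v && c == 0 then
          PySem.List.pyGetD kLinha ((pvBuildFirst k).getD v 0) 0 else v := by
  by_cases hc0 : (c == 0) = true
  · have hc : c = 0 := by exact eq_of_beq hc0
    subst hc
    have hz := pvCell_zero kLinha k 0 v
    simp only [Nat.cast_zero, zero_add] at hz
    rw [hz, pvBuildFirst_contains, pvBuildFirst_getD]
    by_cases hm : v ∈ k
    · simp [hm]
    · simp [hm]
  · have hcf : (c == 0) = false := by simp at hc0 ⊢; exact hc0
    rw [pvCell_frozen kLinha _ v c hcf]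
    simp [hcf]

-- ===== VERDICT (by name: the statement is the Claim_ definition above) =====
theorem geraNovoVetor_spec : Claim_equal_geraNovoVetor := by
  intro k kLinha vi vc _hdom hpre
  unfold Spec_geraNovoVetor geraNovoVetor geraNovoVetor_alt
  have hnf : ∀ j : Nat, j < vi.length → vc.length ≤ j →
      ∀ p' ∈ PySem.List.enumerate k 0, (vi.getD j 0 == p'.2) = false := by
    intro j hj hjc p' hp'
    have hmem : p'.2 ∈ k := by
      rw [PySem.List.mem_enumerate_iff] at hp'
      obtain ⟨t, ht, rfl⟩ := hp'
      simp
    by_cases hvk : vi.getD j 0 ∈ k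
    · unfold Pre_geraNovoVetor at hpre
      exact absurd (hpre j hj hvk).1 (by omega)
    · simp only [beq_eq_false_iff_ne, ne_eq]
      intro he
      exact hvk (he ▸ hmem)
  obtain ⟨a1, _a2, a3⟩ := pvOuter_char kLinha (PySem.List.enumerate k 0) vi vc hnf
  have hb := pvB_char kLinha (pvBuildFirst k) vi 0 [] vc
  simp only [Nat.cast_zero, List.nil_append, Nat.zero_add, zero_add] at hb
  rw [hb]
  apply List.ext_getElem
  · rw [a1]; simp
  · intro n hn1 hn2
    have hn : n < vi.length := by rw [a1] at hn1; exact hn1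
    rw [List.getElem_mapIdx]
    have hgd : ∀ (l : List Int) (m : Nat) (h : m < l.length), l.getD m 0 = l[m] :=
      fun l m h => List.getD_eq_getElem l 0 h
    rw [← hgd _ n hn1, (a3 n hn).1, pvCell_eq_lookup, hgd vi n hn]
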